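-- pv_equiv track=rewrite | github.com/invertome/TSignal_toolkit | scripts/process_predictions.py | find_cleavage_site
-- ===== SOURCE A (Python) =====
-- def find_cleavage_site(pred_labels):
--     """
--     Find cleavage site position from prediction labels.
--
--     TSignal labels each residue with:
--     - S/T/L/W/P = Signal peptide residue (different types)
--     - O = Other (mature protein)
--     - I = Cytoplasmic (no SP)
--     - M = Membrane
--
--     Returns 1-based position of the last SP residue (cleavage occurs after this).
--     """
--     sp_char = pred_labels[0]
--
--     # Only look for cleavage site if it's a signal peptide type
--     if sp_char not in ['S', 'T', 'L', 'W', 'P']: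
--         return 0
--
--     cs_pos = 0
--     for i, c in enumerate(pred_labels):
--         if c == sp_char:
--             cs_pos = i + 1  # 1-based position
--         elif c in ['O', 'I', 'M', 'E']:
--             # End of signal peptide region
--             break
--
--     return cs_pos
-- ===== SOURCE B (Python) =====
-- def find_cleavage_site(pred_labels):
--     sp_char = pred_labels[0]
--     if sp_char not in ('S', 'T', 'L', 'W', 'P'):
--         return 0
--     # pass 1: boundary = index of first terminator (end of SP region)
--     end = len(pred_labels)
--     for i, c in enumerate(pred_labels):
--         if c in ('O', 'I', 'M', 'E'):
--             end = i
--             break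
--     # pass 2: scan backwards for the last sp_char before the boundary
--     for i in range(end - 1, -1, -1):
--         if pred_labels[i] == sp_char:
--             return i + 1
--     return 0
-- ===== Notes on version B (the rewrite author's own statement) =====
-- stated objective: alternative
-- what changed: Replaces A's forward running-max scan (tracking cs_pos while breaking on terminators) by a two-pass decomposition: first find the terminator boundary, then scan backwards from it and return at the first sp_char match.
-- outside the precondition, e.g. on find_cleavage_site(''): A raises IndexError, B raises IndexError
import Mathlib
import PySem

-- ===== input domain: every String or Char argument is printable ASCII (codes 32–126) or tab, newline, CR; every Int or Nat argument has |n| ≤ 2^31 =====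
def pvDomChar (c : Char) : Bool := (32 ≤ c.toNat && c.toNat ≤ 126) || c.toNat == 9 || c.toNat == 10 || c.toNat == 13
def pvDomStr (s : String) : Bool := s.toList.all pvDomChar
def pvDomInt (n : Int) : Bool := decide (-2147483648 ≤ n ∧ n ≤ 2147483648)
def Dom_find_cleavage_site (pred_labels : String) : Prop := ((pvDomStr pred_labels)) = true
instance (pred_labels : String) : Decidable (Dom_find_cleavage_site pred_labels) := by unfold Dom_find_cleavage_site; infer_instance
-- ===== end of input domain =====

-- B replaces A's forward running-max scan by a boundary-then-backward-search two-pass decomposition (alternative, same cost).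


-- ===== PORT A =====
-- A's forward loop: i-indexed scan; cs updated to i+1 on sp_char, break on a terminator.
def loopA (sp : Char) : List Char → Nat → Int → Int
  | [], _, cs => cs
  | c :: rest, i, cs =>
    if c == sp then loopA sp rest (i + 1) ((i : Int) + 1)
    else if (['O', 'I', 'M', 'E'] : List Char).contains c then cs
    else loopA sp rest (i + 1) cs

def find_cleavage_site (pred_labels : String) : Int :=
  match pred_labels.toList with
  | [] => 0  -- Python raises IndexError on pred_labels[0]; excluded by Pre_
  | sp :: rest =>
    if (['S', 'T', 'L', 'W', 'P'] : List Char).contains sp then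
      loopA sp (sp :: rest) 0 0
    else 0

-- ===== PORT B =====
-- pass 1: index of the first terminator, defaulting to the length.
def findEnd : List Char → Nat
  | [] => 0
  | c :: rest => if (['O', 'I', 'M', 'E'] : List Char).contains c then 0 else findEnd rest + 1

-- pass 2: backward scan from index e-1 down to 0; first match returns i+1.
def revFind (sp : Char) (chars : List Char) : Nat → Int
  | 0 => 0
  | n + 1 => if chars.getD n ' ' == sp then (n : Int) + 1 else revFind sp chars n

def find_cleavage_site_alt (pred_labels : String) : Int :=
  match pred_labels.toList with
  | [] => 0  -- Python raises IndexError on pred_labels[0]; excluded by Pre_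
  | sp :: rest =>
    if (['S', 'T', 'L', 'W', 'P'] : List Char).contains sp then
      revFind sp (sp :: rest) (findEnd (sp :: rest))
    else 0

-- ===== PRECONDITION & SPEC =====
-- Pre_ excludes only the empty string, on which Python's pred_labels[0] raises IndexError.
def Pre_find_cleavage_site (pred_labels : String) : Prop := pred_labels ≠ ""
instance (pred_labels : String) : Decidable (Pre_find_cleavage_site pred_labels) := by unfold Pre_find_cleavage_site; infer_instance
def pvWitness_find_cleavage_site : String := "SSTO"

def Spec_find_cleavage_site (pred_labels : String) (out : Int) : Prop := out = find_cleavage_site_alt pred_labels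
instance (pred_labels : String) (out : Int) : Decidable (Spec_find_cleavage_site pred_labels out) := by unfold Spec_find_cleavage_site; infer_instance

-- ===== CLAIM (what is proved, stated in full; the proofs are below) =====
def Claim_equal_find_cleavage_site : Prop := ∀ (pred_labels : String), Dom_find_cleavage_site pred_labels → Pre_find_cleavage_site pred_labels → Spec_find_cleavage_site pred_labels (find_cleavage_site pred_labels)

-- ===== LEMMAS AND PROOFS =====

-- last index (from the front) of sp, preferring the deepest match
def lastIdx (sp : Char) : List Char → Option Nat
  | [] => none
  | c :: rest =>
    match lastIdx sp rest with
    | some j => some (j + 1)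
    | none => if c == sp then some 0 else none

lemma findEnd_le_length (l : List Char) : findEnd l ≤ l.length := by
  induction l with
  | nil => simp [findEnd]
  | cons c rest ih =>
    simp only [findEnd, List.length_cons]
    split <;> omega

lemma lastIdx_append_singleton (sp c : Char) (l : List Char) :
    lastIdx sp (l ++ [c]) = if c == sp then some l.length else lastIdx sp l := by
  induction l with
  | nil =>
    by_cases hc : (c == sp) = true
    · simp [lastIdx, hc]
    · simp [lastIdx, hc]
  | cons d rest ih =>
    by_cases hc : (c == sp) = true
    · simp only [List.cons_append, lastIdx, ih, if_pos hc, List.length_cons]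
    · simp only [List.cons_append, lastIdx, ih, if_neg hc]

lemma revFind_eq_lastIdx (sp : Char) (chars : List Char) (e : Nat) (he : e ≤ chars.length)
    (hsp : sp ≠ ' ') :
    revFind sp chars e =
      match lastIdx sp (chars.take e) with
      | some j => (j : Int) + 1
      | none => 0 := by
  induction e with
  | zero => simp [revFind, lastIdx]
  | succ n ih =>
    have hn : n < chars.length := by omega
    have htake : chars.take (n + 1) = chars.take n ++ [chars.getD n ' '] := by
      rw [List.take_succ]
      simp [List.getElem?_eq_getElem hn, List.getD, List.getElem?_eq_getElem hn]
    rw [revFind, htake, lastIdx_append_singleton]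
    by_cases hc : (chars.getD n ' ' == sp) = true
    · rw [if_pos hc, if_pos hc]
      simp [List.length_take, Nat.min_eq_left (Nat.le_of_lt hn)]
    · rw [if_neg hc, if_neg hc, ih (by omega)]

lemma loopA_eq (sp : Char) (chars : List Char) (i : Nat) (cs : Int)
    (hsp : ¬ (['O', 'I', 'M', 'E'] : List Char).contains sp = true) :
    loopA sp chars i cs =
      match lastIdx sp (chars.take (findEnd chars)) with
      | some j => (i : Int) + j + 1
      | none => cs := by
  induction chars generalizing i cs with
  | nil => simp [loopA, findEnd, lastIdx]
  | cons c rest ih =>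
    simp only [loopA, findEnd]
    by_cases hceq : (c == sp) = true
    · have hcne : ¬ (['O', 'I', 'M', 'E'] : List Char).contains c = true := by
        have hce : c = sp := by simpa using hceq
        rw [hce]; exact hsp
      rw [if_pos hceq, if_neg hcne, List.take_succ_cons]
      simp only [lastIdx]
      rw [ih]
      rcases h : lastIdx sp (List.take (findEnd rest) rest) with _ | j
      · rw [if_pos hceq]
        push_cast; ring
      · push_cast; ring
    · rw [if_neg hceq]
      by_cases hterm : (['O', 'I', 'M', 'E'] : List Char).contains c = true
      · rw [if_pos hterm, if_pos hterm]
        simp [lastIdx]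
      · rw [if_neg hterm, if_neg hterm, List.take_succ_cons]
        simp only [lastIdx]
        rw [ih]
        rcases h : lastIdx sp (List.take (findEnd rest) rest) with _ | j
        · rw [if_neg hceq]
        · push_cast; ring

-- ===== VERDICT (by name: the statement is the Claim_ definition above) =====
theorem find_cleavage_site_spec : Claim_equal_find_cleavage_site := by
  intro pred_labels _ hpre
  unfold Spec_find_cleavage_site find_cleavage_site find_cleavage_site_alt
  rcases h : pred_labels.toList with _ | ⟨sp, rest⟩
  · rfl
  · dsimp only
    by_cases hsp : (['S', 'T', 'L', 'W', 'P'] : List Char).contains sp = true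
    · rw [if_pos hsp, if_pos hsp]
      have hsp5 : sp = 'S' ∨ sp = 'T' ∨ sp = 'L' ∨ sp = 'W' ∨ sp = 'P' := by
        simpa using hsp
      have hterm : ¬ (['O', 'I', 'M', 'E'] : List Char).contains sp = true := by
        rcases hsp5 with h | h | h | h | h <;> simp [h]
      have hsp' : sp ≠ ' ' := by
        rcases hsp5 with h | h | h | h | h <;> simp [h]
      rw [loopA_eq sp (sp :: rest) 0 0 hterm,
          revFind_eq_lastIdx sp (sp :: rest) (findEnd (sp :: rest))
            (findEnd_le_length _) hsp']
      rcases lastIdx sp ((sp :: rest).take (findEnd (sp :: rest))) with _ | j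
      · rfl
      · simp
    · rw [if_neg hsp, if_neg hsp]
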